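-- pv_equiv track=rewrite | github.com/omiq/TRSE | tools/flf_tool/flf_tool.py | flip_sprite_bit
-- ===== SOURCE A (Python) =====
-- def flip_sprite_bit(cnt: int, p_byte: int, mask: int) -> int:
--     """PixelChar::flipSpriteBit — sprite export nibble swap for multicolor."""
--     k = p_byte & 0xFF
--     if mask == 0b1:
--         return k
--     for i in range(0, 8, 2):
--         msk = 0b11 << i
--         j = (k >> i) & 0b11
--         n = j
--         if j == 1:
--             n = 3
--         if j == 3:
--             n = 1
--         k = (k & ~msk) | (n << i)
--     return k & 0xFF
-- ===== SOURCE B (Python) =====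
-- def flip_sprite_bit(cnt: int, p_byte: int, mask: int) -> int:
--     """Closed-form bit trick: swapping 01<->11 in each 2-bit pair toggles the
--     high bit of a pair exactly when its low bit is set."""
--     k = p_byte & 0xFF
--     if mask == 0b1:
--         return k
--     return (k ^ ((k & 0x55) << 1)) & 0xFF
-- ===== Notes on version B (the rewrite author's own statement) =====
-- stated objective: idiomatic
-- what changed: The four-iteration loop with per-pair branching is replaced by a single closed-form bitwise expression (k ^ ((k & 0x55) << 1)) & 0xFF that toggles each pair's high bit when its low bit is set.
import Mathlib
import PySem

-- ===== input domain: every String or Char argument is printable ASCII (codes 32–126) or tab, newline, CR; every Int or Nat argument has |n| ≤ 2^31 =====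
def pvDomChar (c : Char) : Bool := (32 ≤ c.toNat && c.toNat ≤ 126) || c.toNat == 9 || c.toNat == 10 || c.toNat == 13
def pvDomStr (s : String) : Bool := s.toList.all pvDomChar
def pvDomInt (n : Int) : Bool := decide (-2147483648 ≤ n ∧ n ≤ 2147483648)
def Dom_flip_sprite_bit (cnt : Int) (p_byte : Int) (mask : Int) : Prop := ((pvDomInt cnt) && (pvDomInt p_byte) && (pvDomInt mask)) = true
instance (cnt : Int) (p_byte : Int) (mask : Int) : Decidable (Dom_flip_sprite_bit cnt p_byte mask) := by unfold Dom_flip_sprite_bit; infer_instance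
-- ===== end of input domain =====

-- B replaces A's four-iteration pair-swapping loop by one closed-form bitwise
-- expression (k ^ ((k & 0x55) << 1)) & 0xFF (idiomatic, branch-free).

-- ===== PORT A =====
-- literal port of A's loop over range(0, 8, 2); the shift amounts i are the
-- nonnegative Ints 0,2,4,6, so shifting by i.toNat is exact.
def flip_sprite_bit (cnt : Int) (p_byte : Int) (mask : Int) : Int :=
  let k := PySem.Int.band p_byte 0xFF
  if mask = 1 then k
  else
    let k := (PySem.List.pyRange 0 8 2).foldl (fun k i =>
      let msk : Int := (3 : Int) <<< i.toNat
      let j := PySem.Int.band (k >>> i.toNat) 3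
      let n := j
      let n := if j = 1 then (3 : Int) else n
      let n := if j = 3 then (1 : Int) else n
      PySem.Int.bor (PySem.Int.band k (Int.not msk)) (n <<< i.toNat)) k
    PySem.Int.band k 0xFF

-- ===== PORT B =====
def flip_sprite_bit_alt (cnt : Int) (p_byte : Int) (mask : Int) : Int :=
  let k := PySem.Int.band p_byte 0xFF
  if mask = 1 then k
  else PySem.Int.band (PySem.Int.bxor k ((PySem.Int.band k 0x55) <<< 1)) 0xFF

-- ===== PRECONDITION & SPEC =====
def Spec_flip_sprite_bit (cnt : Int) (p_byte : Int) (mask : Int) (out : Int) : Prop := out = flip_sprite_bit_alt cnt p_byte mask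
instance (cnt : Int) (p_byte : Int) (mask : Int) (out : Int) : Decidable (Spec_flip_sprite_bit cnt p_byte mask out) := by unfold Spec_flip_sprite_bit; infer_instance

-- ===== CLAIM (what is proved, stated in full; the proofs are below) =====
def Claim_equal_flip_sprite_bit : Prop := ∀ (cnt : Int) (p_byte : Int) (mask : Int), Dom_flip_sprite_bit cnt p_byte mask → Spec_flip_sprite_bit cnt p_byte mask (flip_sprite_bit cnt p_byte mask)

-- ===== LEMMAS AND PROOFS =====

-- p_byte & 0xFF is a byte value, for every Int p_byte.
theorem pv_band255_bounds (a : Int) :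
    0 ≤ PySem.Int.band a 255 ∧ PySem.Int.band a 255 < 256 := by
  unfold PySem.Int.band
  have h255 : (255 : Int).toNat = 255 := rfl
  have hle : a.toNat &&& (255 : Int).toNat ≤ 255 := by
    rw [h255]; exact Nat.and_le_right
  have hsub : (255 : Int).toNat - ((255 : Int).toNat &&& (-a - 1).toNat) ≤ 255 := by
    rw [h255]; exact Nat.sub_le _ _
  split_ifs <;> omega

-- A's loop body and B's closed form, as functions of the byte value.
def pvLoopA (k : Int) : Int :=
  PySem.Int.band
    ((PySem.List.pyRange 0 8 2).foldl (fun k i =>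
      let msk : Int := (3 : Int) <<< i.toNat
      let j := PySem.Int.band (k >>> i.toNat) 3
      let n := j
      let n := if j = 1 then (3 : Int) else n
      let n := if j = 3 then (1 : Int) else n
      PySem.Int.bor (PySem.Int.band k (Int.not msk)) (n <<< i.toNat)) k) 255

def pvClosedB (k : Int) : Int :=
  PySem.Int.band (PySem.Int.bxor k ((PySem.Int.band k 0x55) <<< 1)) 255

-- Exhaustive check over all 256 byte values.
set_option maxRecDepth 4000 in
theorem pv_byte_eq : ∀ n : Fin 256, pvLoopA (n : Int) = pvClosedB (n : Int) := by decide

theorem pv_loop_eq_closed (k : Int) (h0 : 0 ≤ k) (h1 : k < 256) :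
    pvLoopA k = pvClosedB k := by
  have hk : k = ((⟨k.toNat, by omega⟩ : Fin 256) : Int) := by
    simp [Int.toNat_of_nonneg h0]
  rw [hk]; exact pv_byte_eq _

-- ===== VERDICT (by name: the statement is the Claim_ definition above) =====
theorem flip_sprite_bit_spec : Claim_equal_flip_sprite_bit := by
  intro cnt p_byte mask _
  unfold Spec_flip_sprite_bit flip_sprite_bit flip_sprite_bit_alt
  by_cases hm : mask = 1
  · simp [hm]
  · simp only [hm, if_false]
    obtain ⟨h0, h1⟩ := pv_band255_bounds p_byte
    exact pv_loop_eq_closed _ h0 h1
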